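-- pv_equiv track=rewrite | github.com/Markov-Andrey/print-server | api/printers.py | parse_printer_status
-- ===== SOURCE A (Python) =====
-- def parse_printer_status(status):
--     if status == 0:
--         return "Online"
--
--     status_flags = {
--         0x00000001: "Paused",
--         0x00000002: "Error",
--         0x00000004: "Pending Deletion",
--         0x00000008: "Paper Jam",
--         0x00000010: "Paper Out",
--         0x00000020: "Manual Feed",
--         0x00000040: "Paper Problem",
--         0x00000080: "Offline",
--         0x00000100: "IO Active",
--         0x00000200: "Busy",
--         0x00000400: "Printing",
--         0x00000800: "Output Bin Full",
--         0x00001000: "Not Available",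
--         0x00002000: "Waiting",
--         0x00004000: "Processing",
--         0x00008000: "Initializing",
--         0x00010000: "Warming Up",
--         0x00020000: "Toner Low",
--         0x00040000: "No Toner",
--         0x00080000: "Page Punt",
--         0x00100000: "User Intervention Required",
--         0x00200000: "Out of Memory",
--         0x00400000: "Door Open",
--         0x00800000: "Server Unknown",
--         0x01000000: "Power Save",
--     }
--
--     readable = [name for code, name in status_flags.items() if status & code]
--     return ", ".join(readable) if readable else f"Unknown (code: {status})"
-- ===== SOURCE B (Python) =====
-- # B: precomputed chunked lookup tables -- the 25-bit mask is split into five 5-bit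
-- # chunks, each chunk value (0..31) indexes a table built once at import time holding
-- # the ready name lists; a call does five table lookups and concatenations, no per-flag
-- # bit testing at all.
-- _NAMES = [
--     "Paused", "Error", "Pending Deletion", "Paper Jam", "Paper Out",
--     "Manual Feed", "Paper Problem", "Offline", "IO Active", "Busy",
--     "Printing", "Output Bin Full", "Not Available", "Waiting", "Processing",
--     "Initializing", "Warming Up", "Toner Low", "No Toner", "Page Punt",
--     "User Intervention Required", "Out of Memory", "Door Open",
--     "Server Unknown", "Power Save",
-- ]
--
-- def _chunk_table(k):
--     return [[_NAMES[5 * k + j] for j in range(5) if (v >> j) % 2 == 1]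
--             for v in range(32)]
--
-- _T = [_chunk_table(k) for k in range(5)]
--
-- def parse_printer_status(status):
--     if status == 0:
--         return "Online"
--     m = status & 0x1FFFFFF
--     names = (_T[0][m % 32] + _T[1][(m >> 5) % 32] + _T[2][(m >> 10) % 32]
--              + _T[3][(m >> 15) % 32] + _T[4][(m >> 20) % 32])
--     return ", ".join(names) if names else f"Unknown (code: {status})"
-- ===== Notes on version B (the rewrite author's own statement) =====
-- stated objective: alternative
-- what changed: Replaces A's per-flag scan of the code->name table with five small lookup tables precomputed at import time (one per five-bit chunk of the masked status); a call does five table indexings and list concatenations instead of one bit test per flag.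
import Mathlib
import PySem

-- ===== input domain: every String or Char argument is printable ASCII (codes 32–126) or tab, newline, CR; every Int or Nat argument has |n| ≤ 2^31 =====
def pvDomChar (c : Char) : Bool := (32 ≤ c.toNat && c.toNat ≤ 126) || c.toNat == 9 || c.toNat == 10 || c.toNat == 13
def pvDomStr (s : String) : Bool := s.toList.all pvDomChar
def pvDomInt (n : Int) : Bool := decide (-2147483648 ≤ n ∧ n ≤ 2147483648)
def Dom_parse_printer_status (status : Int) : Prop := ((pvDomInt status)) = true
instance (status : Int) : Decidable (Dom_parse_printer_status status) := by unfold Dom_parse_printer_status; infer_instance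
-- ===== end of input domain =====

-- B replaces A's per-flag scan with five 32-entry lookup tables precomputed from the
-- 25 names (one per 5-bit chunk of the masked status); a call concatenates five
-- table entries; objective: alternative (same output, constant-size table lookups).

-- ===== PORT A =====
def pvStatusFlags : List (Int × String) := [
    (1, "Paused"),
    (2, "Error"),
    (4, "Pending Deletion"),
    (8, "Paper Jam"),
    (16, "Paper Out"),
    (32, "Manual Feed"),
    (64, "Paper Problem"),
    (128, "Offline"),
    (256, "IO Active"),
    (512, "Busy"),
    (1024, "Printing"),
    (2048, "Output Bin Full"),
    (4096, "Not Available"),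
    (8192, "Waiting"),
    (16384, "Processing"),
    (32768, "Initializing"),
    (65536, "Warming Up"),
    (131072, "Toner Low"),
    (262144, "No Toner"),
    (524288, "Page Punt"),
    (1048576, "User Intervention Required"),
    (2097152, "Out of Memory"),
    (4194304, "Door Open"),
    (8388608, "Server Unknown"),
    (16777216, "Power Save")]

def parse_printer_status (status : Int) : String :=
  if status = 0 then "Online"
  else
    let readable := pvStatusFlags.foldr
      (fun p acc => if PySem.Int.band status p.1 != 0 then p.2 :: acc else acc) []
    if readable ≠ [] then PySem.Str.join ", " readable
    else "Unknown (code: " ++ PySem.Int.toStr status ++ ")"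

-- ===== PORT B =====
def pvNames : List String := [
    "Paused",
    "Error",
    "Pending Deletion",
    "Paper Jam",
    "Paper Out",
    "Manual Feed",
    "Paper Problem",
    "Offline",
    "IO Active",
    "Busy",
    "Printing",
    "Output Bin Full",
    "Not Available",
    "Waiting",
    "Processing",
    "Initializing",
    "Warming Up",
    "Toner Low",
    "No Toner",
    "Page Punt",
    "User Intervention Required",
    "Out of Memory",
    "Door Open",
    "Server Unknown",
    "Power Save"]

-- Source B's _chunk_table(k): for each chunk value v in 0..31, the names of the set bits
-- of v offset by 5*k (list comprehension = filter + map; _NAMES index always in range,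
-- getD is exact there)
def pvChunkTable (k : Nat) : List (List String) :=
  (List.range 32).map (fun v =>
    ((List.range 5).filter (fun j => (v >>> j) % 2 == 1)).map
      (fun j => pvNames.getD (5 * k + j) ""))

-- Source B's _T, built once
def pvT : List (List (List String)) := (List.range 5).map pvChunkTable

def parse_printer_status_alt (status : Int) : String :=
  if status = 0 then "Online"
  else
    let m := (PySem.Int.band status 33554431).toNat
    let names := (pvT.getD 0 []).getD (m % 32) []
      ++ (pvT.getD 1 []).getD ((m >>> 5) % 32) []
      ++ (pvT.getD 2 []).getD ((m >>> 10) % 32) []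
      ++ (pvT.getD 3 []).getD ((m >>> 15) % 32) []
      ++ (pvT.getD 4 []).getD ((m >>> 20) % 32) []
    if names ≠ [] then PySem.Str.join ", " names
    else "Unknown (code: " ++ PySem.Int.toStr status ++ ")"

-- ===== PRECONDITION & SPEC =====
def Spec_parse_printer_status (status : Int) (out : String) : Prop := out = parse_printer_status_alt status
instance (status : Int) (out : String) : Decidable (Spec_parse_printer_status status out) := by unfold Spec_parse_printer_status; infer_instance

-- ===== CLAIM (what is proved, stated in full; the proofs are below) =====
def Claim_equal_parse_printer_status : Prop := ∀ (status : Int), Dom_parse_printer_status status → Spec_parse_printer_status status (parse_printer_status status)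

-- ===== LEMMAS AND PROOFS =====

-- reference form: the name list of the k lowest bits of m, low-to-high, bit index i first
def pvBitsUpTo : Nat → Nat → Nat → List String
  | 0, _, _ => []
  | k + 1, m, i => (if m % 2 = 1 then [pvNames.getD i ""] else []) ++ pvBitsUpTo k (m / 2) (i + 1)

theorem pvSplit (a b m i : Nat) :
    pvBitsUpTo (a + b) m i = pvBitsUpTo a m i ++ pvBitsUpTo b (m / 2 ^ a) (i + a) := by
  induction a generalizing m i with
  | zero => simp [pvBitsUpTo]
  | succ a ih =>
    rw [show a + 1 + b = (a + b) + 1 from by omega]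
    rw [pvBitsUpTo, pvBitsUpTo, ih, List.append_assoc]
    rw [Nat.div_div_eq_div_mul, show 2 * 2 ^ a = 2 ^ (a + 1) from by ring]
    rw [show i + 1 + a = i + (a + 1) from by omega]

theorem pvMod (k m i : Nat) : pvBitsUpTo k m i = pvBitsUpTo k (m % 2 ^ k) i := by
  induction k generalizing m i with
  | zero => rfl
  | succ k ih =>
    rw [pvBitsUpTo, pvBitsUpTo, ih (m / 2)]
    have h1 : m % 2 ^ (k + 1) % 2 = m % 2 := Nat.mod_mod_of_dvd m (dvd_pow_self 2 (Nat.succ_ne_zero k))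
    have h2 : m % 2 ^ (k + 1) / 2 = m / 2 % 2 ^ k := by
      rw [show (2 : Nat) ^ (k + 1) = 2 * 2 ^ k from by ring, Nat.mod_mul_right_div_self]
    rw [h1, h2]

-- the precomputed tables agree with the reference form on every chunk value
theorem pvChunkEq : ∀ k < 5, ∀ c < 32, (pvT.getD k []).getD c [] = pvBitsUpTo 5 c (5 * k) := by decide

theorem pvChunks (m : Nat) :
    pvBitsUpTo 25 m 0 =
      (pvT.getD 0 []).getD (m % 32) []
      ++ (pvT.getD 1 []).getD ((m >>> 5) % 32) []
      ++ (pvT.getD 2 []).getD ((m >>> 10) % 32) []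
      ++ (pvT.getD 3 []).getD ((m >>> 15) % 32) []
      ++ (pvT.getD 4 []).getD ((m >>> 20) % 32) [] := by
  rw [pvChunkEq 0 (by norm_num) _ (Nat.mod_lt _ (by norm_num)),
      pvChunkEq 1 (by norm_num) _ (Nat.mod_lt _ (by norm_num)),
      pvChunkEq 2 (by norm_num) _ (Nat.mod_lt _ (by norm_num)),
      pvChunkEq 3 (by norm_num) _ (Nat.mod_lt _ (by norm_num)),
      pvChunkEq 4 (by norm_num) _ (Nat.mod_lt _ (by norm_num))]
  simp only [Nat.shiftRight_eq_div_pow]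
  rw [show (25 : Nat) = 5 + (5 + (5 + (5 + 5))) from rfl]
  rw [pvSplit 5, pvSplit 5, pvSplit 5, pvSplit 5]
  rw [pvMod 5 m 0, pvMod 5 (m / 2 ^ 5), pvMod 5 (m / 2 ^ 5 / 2 ^ 5),
      pvMod 5 (m / 2 ^ 5 / 2 ^ 5 / 2 ^ 5), pvMod 5 (m / 2 ^ 5 / 2 ^ 5 / 2 ^ 5 / 2 ^ 5)]
  norm_num [Nat.div_div_eq_div_mul, List.append_assoc]

theorem pvIteSingletonAppend {c : Prop} [Decidable c] (a : String) (r : List String) :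
    (if c then [a] else []) ++ r = if c then a :: r else r := by
  split <;> simp

-- Python's nonzero test on a power-of-two bit mask, in div/mod form
theorem pvAndPow (s i : Nat) : (s &&& 2 ^ i ≠ 0) ↔ s / 2 ^ i % 2 = 1 := by
  rw [Nat.and_two_pow]
  rcases h : s.testBit i <;>
    simp_all [Nat.testBit, Nat.shiftRight_eq_div_pow]

theorem pvSubAndPow (s i : Nat) : (2 ^ i - (2 ^ i &&& s) ≠ 0) ↔ s / 2 ^ i % 2 = 0 := by
  rw [Nat.two_pow_and]
  rcases h : s.testBit i <;>
    simp_all [Nat.testBit, Nat.shiftRight_eq_div_pow]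

theorem pvMaskMod (s : Nat) : s &&& 33554431 = s % 33554432 := by
  have := Nat.and_two_pow_sub_one_eq_mod s 25
  norm_num at this
  simpa using this

theorem pvBandNeg (s c : Nat) :
    PySem.Int.band (Int.negSucc s) (Int.ofNat c) = Int.ofNat (c - (c &&& s)) := by
  simp [PySem.Int.band]

theorem pvACondPos (s c i : Nat) (hc : c = 2 ^ i) :
    (PySem.Int.band (Int.ofNat s) (Int.ofNat c) != 0) = decide (s / 2 ^ i % 2 = 1) := by
  subst hc
  rw [show ((Int.ofNat s) : Int) = ((s : Nat) : Int) from rfl,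
    show ((Int.ofNat (2 ^ i)) : Int) = (((2 ^ i : Nat) : Nat) : Int) from rfl,
    PySem.Int.band_natCast, Bool.eq_iff_iff]
  simp [pvAndPow]

theorem pvACondNeg (s c i : Nat) (hc : c = 2 ^ i) :
    (PySem.Int.band (Int.negSucc s) (Int.ofNat c) != 0) = decide (s / 2 ^ i % 2 = 0) := by
  subst hc
  rw [pvBandNeg, Bool.eq_iff_iff]
  simp [pvSubAndPow]

-- generic forms of the two band tests, with the mask written as a power of two
theorem pvACondPosPow (s i : Nat) :
    (PySem.Int.band (Int.ofNat s) ((2 : Int) ^ i) != 0) = decide (s / 2 ^ i % 2 = 1) := by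
  have h : ((2 : Int) ^ i) = Int.ofNat (2 ^ i) := by
    rw [show Int.ofNat (2 ^ i) = ((2 ^ i : Nat) : Int) from rfl]; push_cast; ring
  rw [h]; exact pvACondPos s (2 ^ i) i rfl

theorem pvACondNegPow (s i : Nat) :
    (PySem.Int.band (Int.negSucc s) ((2 : Int) ^ i) != 0) = decide (s / 2 ^ i % 2 = 0) := by
  have h : ((2 : Int) ^ i) = Int.ofNat (2 ^ i) := by
    rw [show Int.ofNat (2 ^ i) = ((2 ^ i : Nat) : Int) from rfl]; push_cast; ring
  rw [h]; exact pvACondNeg s (2 ^ i) i rfl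

-- abstract bit list under an arbitrary Boolean condition on the bit index
def pvBitsCond (q : Nat → Bool) : Nat → Nat → List String
  | 0, _ => []
  | k + 1, i => (if q i then [pvNames.getD i ""] else []) ++ pvBitsCond q k (i + 1)

theorem pvBitsCond_congr (q q' : Nat → Bool) (k i : Nat)
    (h : ∀ j, i ≤ j → j < i + k → q j = q' j) : pvBitsCond q k i = pvBitsCond q' k i := by
  induction k generalizing i with
  | zero => rfl
  | succ k ih =>
    rw [pvBitsCond, pvBitsCond, h i (le_refl i) (by omega),
      ih (i + 1) (fun j hj1 hj2 => h j (by omega) (by omega))]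

theorem pvBitsUpTo_cond (k m i : Nat) :
    pvBitsUpTo k m i = pvBitsCond (fun j => decide (m / 2 ^ (j - i) % 2 = 1)) k i := by
  induction k generalizing m i with
  | zero => rfl
  | succ k ih =>
    rw [pvBitsUpTo, pvBitsCond, ih (m / 2) (i + 1)]
    congr 1
    · simp
    · apply pvBitsCond_congr; intro j hj1 hj2
      simp only [decide_eq_decide]
      have h2 : 2 ^ (j - i) = 2 * 2 ^ (j - (i + 1)) := by
        rw [show j - i = (j - (i + 1)) + 1 from by omega]; ring
      rw [Nat.div_div_eq_div_mul, ← h2]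

-- the flag table is the first 25 powers of two paired with the name table
theorem pvFlags_eq :
    pvStatusFlags = (List.range' 0 25).map (fun j => ((2 : Int) ^ j, pvNames.getD j "")) := by
  decide

theorem pvFoldrRange (status : Int) (k i : Nat) :
    ((List.range' i k).map (fun j => ((2 : Int) ^ j, pvNames.getD j ""))).foldr
      (fun p acc => if PySem.Int.band status p.1 != 0 then p.2 :: acc else acc) []
      = pvBitsCond (fun j => PySem.Int.band status ((2 : Int) ^ j) != 0) k i := by
  induction k generalizing i with
  | zero => rfl
  | succ k ih =>
    rw [List.range'_succ, List.map_cons, List.foldr_cons, ih (i + 1), pvBitsCond,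
      pvIteSingletonAppend]

-- A's foldr over the flag table is the abstract bit list under the band test
theorem pvFoldr_eq (status : Int) :
    pvStatusFlags.foldr
      (fun p acc => if PySem.Int.band status p.1 != 0 then p.2 :: acc else acc) []
      = pvBitsCond (fun j => PySem.Int.band status ((2 : Int) ^ j) != 0) 25 0 := by
  rw [pvFlags_eq, pvFoldrRange]

theorem pvMPos (s : Nat) : (PySem.Int.band (Int.ofNat s) 33554431).toNat = s % 33554432 := by
  rw [show ((Int.ofNat s) : Int) = ((s : Nat) : Int) from rfl,
    show (33554431 : Int) = (((33554431 : Nat) : Nat) : Int) from rfl, PySem.Int.band_natCast]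
  simp [pvMaskMod]
  omega

theorem pvMNeg (s : Nat) : (PySem.Int.band (Int.negSucc s) 33554431).toNat = 33554431 - s % 33554432 := by
  rw [show (33554431 : Int) = Int.ofNat 33554431 from rfl, pvBandNeg,
    Nat.land_comm 33554431 s, pvMaskMod]
  simp

theorem pvLists_eq (status : Int) :
    pvStatusFlags.foldr
      (fun p acc => if PySem.Int.band status p.1 != 0 then p.2 :: acc else acc) []
      = pvBitsUpTo 25 (PySem.Int.band status 33554431).toNat 0 := by
  rw [pvFoldr_eq, pvBitsUpTo_cond]
  rcases status with s | s
  · rw [pvMPos]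
    apply pvBitsCond_congr; intro j _ hj
    rw [pvACondPosPow s j]
    simp only [decide_eq_decide, Nat.sub_zero]
    interval_cases j <;> (norm_num; try omega)
  · rw [pvMNeg]
    apply pvBitsCond_congr; intro j _ hj
    rw [pvACondNegPow s j]
    simp only [decide_eq_decide, Nat.sub_zero]
    interval_cases j <;> (norm_num; try omega)

-- ===== VERDICT (by name: the statement is the Claim_ definition above) =====
theorem parse_printer_status_spec : Claim_equal_parse_printer_status := by
  intro status _
  unfold Spec_parse_printer_status parse_printer_status parse_printer_status_alt
  by_cases h0 : status = 0
  · simp [h0]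
  · simp only [if_neg h0, pvLists_eq status, pvChunks]
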